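-- pv_equiv track=rewrite | github.com/JOYCHEN777/CU_assignments | CMT120/p_c.py | knight_dfs
-- ===== SOURCE A (Python) =====
-- def knight_dfs(arr, i, j, n):
--     # if it has moved maximum length, return false
--     if n < 0:
--         return False
--     # if it move to the position beyond arr，return false
--     if i < 0 or i > 7 or j < 0 or j > 7:
--         return False
--     # if it is in the target position, return true
--     if arr[i][j] == 1:
--         return True
--     return (knight_dfs(arr, i + 1, j + 2, n - 1)
--             or knight_dfs(arr, i + 1, j - 2, n - 1)
--             or knight_dfs(arr, i - 1, j + 2, n - 1)
--             or knight_dfs(arr, i - 1, j - 2, n - 1)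
--             or knight_dfs(arr, i + 2, j + 1, n - 1)
--             or knight_dfs(arr, i + 2, j - 1, n - 1)
--             or knight_dfs(arr, i - 2, j + 1, n - 1)
--             or knight_dfs(arr, i - 2, j - 1, n - 1))
-- ===== SOURCE B (Python) =====
-- MOVES = [(1, 2), (1, -2), (-1, 2), (-1, -2), (2, 1), (2, -1), (-2, 1), (-2, -1)]
--
-- def knight_dfs(arr, i, j, n):
--     # Bottom-up DP over the 64 board cells instead of the 8-way recursive DFS.
--     if n < 0 or not (0 <= i <= 7 and 0 <= j <= 7):
--         return False
--     # cur = set of squares from which the target is reachable in 0 moves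
--     cur = {(x, y) for x in range(8) for y in range(8) if arr[x][y] == 1}
--     # one expansion per allowed move; 63 rounds already reach the fixpoint
--     for _ in range(min(n, 63)):
--         cur = {(x, y) for x in range(8) for y in range(8)
--                if arr[x][y] == 1
--                or any((x + dx, y + dy) in cur for dx, dy in MOVES)}
--     return (i, j) in cur
-- ===== Notes on version B (the rewrite author's own statement) =====
-- stated objective: alternative
-- what changed: Replaces the 8-way recursive DFS with depth budget n by a bottom-up dynamic program: the set of board squares from which the target is reachable is expanded once per move, capped at 63 rounds (the fixpoint on a 64-cell board); it trades deep recursion for at most 63 whole-board passes.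
-- outside the precondition, e.g. on knight_dfs([[1]], 0, 0, 0): A returns True, B raises IndexError
import Mathlib
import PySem

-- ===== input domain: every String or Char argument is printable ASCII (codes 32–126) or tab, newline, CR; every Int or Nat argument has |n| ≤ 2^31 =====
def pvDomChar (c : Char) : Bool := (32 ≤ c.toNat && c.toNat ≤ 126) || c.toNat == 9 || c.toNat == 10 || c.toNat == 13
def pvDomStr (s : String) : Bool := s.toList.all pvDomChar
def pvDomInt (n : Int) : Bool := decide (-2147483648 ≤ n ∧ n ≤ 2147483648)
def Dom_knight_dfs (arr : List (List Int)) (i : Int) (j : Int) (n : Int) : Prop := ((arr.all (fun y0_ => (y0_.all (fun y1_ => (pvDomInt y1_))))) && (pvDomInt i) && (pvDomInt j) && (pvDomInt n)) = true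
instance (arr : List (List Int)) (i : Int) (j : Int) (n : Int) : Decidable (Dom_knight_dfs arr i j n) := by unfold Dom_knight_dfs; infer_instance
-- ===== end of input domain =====

-- B replaces A's 8-way recursive DFS by a bottom-up DP over the 64 board squares (alternative algorithm).


-- ===== PORT A =====
def knight_dfs (arr : List (List Int)) (i : Int) (j : Int) (n : Int) : Bool :=
  if n < 0 then false
  else if i < 0 || i > 7 || j < 0 || j > 7 then false
  else
    match (PySem.List.pyGet? arr i).bind (fun row => PySem.List.pyGet? row j) with
    | none => false  -- arr[i][j] raised IndexError in Python; excluded by Pre_knight_dfs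
    | some v =>
      if v == 1 then true
      else
        knight_dfs arr (i+1) (j+2) (n-1) || knight_dfs arr (i+1) (j-2) (n-1) ||
        knight_dfs arr (i-1) (j+2) (n-1) || knight_dfs arr (i-1) (j-2) (n-1) ||
        knight_dfs arr (i+2) (j+1) (n-1) || knight_dfs arr (i+2) (j-1) (n-1) ||
        knight_dfs arr (i-2) (j+1) (n-1) || knight_dfs arr (i-2) (j-1) (n-1)
termination_by (n+1).toNat
decreasing_by all_goals omega

-- ===== PORT B =====
def knightMoves : List (Int × Int) := [(1,2),(1,-2),(-1,2),(-1,-2),(2,1),(2,-1),(-2,1),(-2,-1)]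

-- the 64 board squares, from {(x,y) for x in range(8) for y in range(8) ...}
def knightCells : List (Int × Int) :=
  (PySem.List.pyRange 0 8 1).flatMap (fun x => (PySem.List.pyRange 0 8 1).map (fun y => (x, y)))

-- arr[x][y] == 1 (none = IndexError; excluded by Pre_knight_dfs)
def knightVal (arr : List (List Int)) (x y : Int) : Bool :=
  ((PySem.List.pyGet? arr x).bind (fun row => PySem.List.pyGet? row y)) == some 1

def knightBase (arr : List (List Int)) : List (Int × Int) :=
  knightCells.filter (fun c => knightVal arr c.1 c.2)

def knightStep (arr : List (List Int)) (cur : List (Int × Int)) : List (Int × Int) :=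
  knightCells.filter (fun c =>
    knightVal arr c.1 c.2 ||
    knightMoves.any (fun m => decide ((c.1 + m.1, c.2 + m.2) ∈ cur)))

def knightIter (arr : List (List Int)) : Nat → List (Int × Int) → List (Int × Int)
  | 0, cur => cur
  | k+1, cur => knightIter arr k (knightStep arr cur)

def knight_dfs_alt (arr : List (List Int)) (i : Int) (j : Int) (n : Int) : Bool :=
  if n < 0 || !(0 ≤ i && i ≤ 7 && 0 ≤ j && j ≤ 7) then false
  else decide ((i, j) ∈ knightIter arr (min n 63).toNat (knightBase arr))

-- ===== PRECONDITION & SPEC =====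
-- Pre_ excludes boards that are not full 8×8 while the start square is on the board and n ≥ 0:
-- there A may raise IndexError (or return only if it finds the target before indexing a missing
-- square), while B always reads all 64 squares and raises.
def Pre_knight_dfs (arr : List (List Int)) (i : Int) (j : Int) (n : Int) : Prop :=
  n < 0 ∨ i < 0 ∨ 7 < i ∨ j < 0 ∨ 7 < j ∨
    (8 ≤ arr.length ∧ ∀ row ∈ arr.take 8, 8 ≤ row.length)
instance (arr : List (List Int)) (i : Int) (j : Int) (n : Int) : Decidable (Pre_knight_dfs arr i j n) := by unfold Pre_knight_dfs; infer_instance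

def pvWitness_knight_dfs : List (List Int) × Int × Int × Int := ([], 0, 0, -1)

def Spec_knight_dfs (arr : List (List Int)) (i : Int) (j : Int) (n : Int) (out : Bool) : Prop := out = knight_dfs_alt arr i j n
instance (arr : List (List Int)) (i : Int) (j : Int) (n : Int) (out : Bool) : Decidable (Spec_knight_dfs arr i j n out) := by unfold Spec_knight_dfs; infer_instance

-- ===== CLAIM (what is proved, stated in full; the proofs are below) =====
def Claim_equal_knight_dfs : Prop := ∀ (arr : List (List Int)) (i : Int) (j : Int) (n : Int), Dom_knight_dfs arr i j n → Pre_knight_dfs arr i j n → Spec_knight_dfs arr i j n (knight_dfs arr i j n)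

-- ===== LEMMAS AND PROOFS =====

theorem knight_mem_cells (x y : Int) :
    (x, y) ∈ knightCells ↔ (0 ≤ x ∧ x ≤ 7 ∧ 0 ≤ y ∧ y ≤ 7) := by
  simp [knightCells, List.mem_flatMap, List.mem_map, PySem.List.mem_pyRange_one, Prod.ext_iff]
  omega

theorem knight_mem_step (arr : List (List Int)) (S : List (Int × Int)) (c : Int × Int) :
    c ∈ knightStep arr S ↔
      c ∈ knightCells ∧ (knightVal arr c.1 c.2 = true ∨
        ∃ m ∈ knightMoves, (c.1 + m.1, c.2 + m.2) ∈ S) := by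
  simp [knightStep, List.mem_filter, List.any_eq_true]

theorem knightIter_succ_out (arr : List (List Int)) (k : Nat) (cur : List (Int × Int)) :
    knightIter arr (k+1) cur = knightStep arr (knightIter arr k cur) := by
  induction k generalizing cur with
  | zero => rfl
  | succ k ih => show knightIter arr (k+1) (knightStep arr cur) = _; rw [ih]; rfl

theorem knight_mem_iter_cells (arr : List (List Int)) (k : Nat) (c : Int × Int)
    (h : c ∈ knightIter arr k (knightBase arr)) : c ∈ knightCells := by
  cases k with
  | zero => exact (List.mem_filter.mp h).1
  | succ k =>
    rw [knightIter_succ_out] at h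
    exact ((knight_mem_step arr _ c).mp h).1

theorem knight_step_mono (arr : List (List Int)) {A B : List (Int × Int)}
    (h : ∀ x, x ∈ A → x ∈ B) (c : Int × Int)
    (hc : c ∈ knightStep arr A) : c ∈ knightStep arr B := by
  rw [knight_mem_step] at hc ⊢
  exact ⟨hc.1, hc.2.imp id (fun ⟨m, hm, hmem⟩ => ⟨m, hm, h _ hmem⟩)⟩

theorem knight_step_congr (arr : List (List Int)) {A B : List (Int × Int)}
    (h : ∀ x, x ∈ A ↔ x ∈ B) (c : Int × Int) :
    c ∈ knightStep arr A ↔ c ∈ knightStep arr B :=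
  ⟨knight_step_mono arr (fun x => (h x).mp) c, knight_step_mono arr (fun x => (h x).mpr) c⟩

theorem knight_iter_mono (arr : List (List Int)) (k : Nat) (c : Int × Int)
    (h : c ∈ knightIter arr k (knightBase arr)) :
    c ∈ knightIter arr (k+1) (knightBase arr) := by
  induction k generalizing c with
  | zero =>
    rw [knightIter_succ_out, knight_mem_step]
    exact ⟨(List.mem_filter.mp h).1, Or.inl (by simpa using (List.mem_filter.mp h).2)⟩
  | succ k ih =>
    rw [knightIter_succ_out] at h ⊢
    exact knight_step_mono arr ih c h

theorem knight_stab_of (arr : List (List Int)) (k : Nat)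
    (h : ∀ c, c ∈ knightIter arr k (knightBase arr) ↔ c ∈ knightIter arr (k+1) (knightBase arr)) :
    ∀ t c, c ∈ knightIter arr (k+t) (knightBase arr) ↔ c ∈ knightIter arr k (knightBase arr) := by
  intro t
  induction t with
  | zero => intro c; rfl
  | succ t ih =>
    intro c
    have : k + (t+1) = (k+t) + 1 := by omega
    rw [this, knightIter_succ_out]
    calc c ∈ knightStep arr (knightIter arr (k+t) (knightBase arr))
        ↔ c ∈ knightStep arr (knightIter arr k (knightBase arr)) := knight_step_congr arr ih c
      _ ↔ c ∈ knightIter arr (k+1) (knightBase arr) := by rw [knightIter_succ_out]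
      _ ↔ c ∈ knightIter arr k (knightBase arr) := (h c).symm

theorem knight_card_le (arr : List (List Int)) (k : Nat) :
    (knightIter arr k (knightBase arr)).toFinset.card ≤ 64 := by
  have hsub : (knightIter arr k (knightBase arr)).toFinset ⊆ knightCells.toFinset := by
    intro c hc
    rw [List.mem_toFinset] at hc ⊢
    exact knight_mem_iter_cells arr k c hc
  have : knightCells.toFinset.card = 64 := by decide
  exact le_trans (Finset.card_le_card hsub) (le_of_eq this)

theorem knight_exists_fix (arr : List (List Int)) :
    ∃ k ≤ 63, ∀ c, c ∈ knightIter arr k (knightBase arr) ↔ c ∈ knightIter arr (k+1) (knightBase arr) := by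
  by_contra h
  push Not at h
  have hlt : ∀ k ≤ 63, (knightIter arr k (knightBase arr)).toFinset.card <
      (knightIter arr (k+1) (knightBase arr)).toFinset.card := by
    intro k hk
    obtain ⟨c, hc⟩ := h k hk
    have hsub : (knightIter arr k (knightBase arr)).toFinset ⊆
        (knightIter arr (k+1) (knightBase arr)).toFinset := by
      intro x hx
      rw [List.mem_toFinset] at hx ⊢
      exact knight_iter_mono arr k x hx
    apply Finset.card_lt_card
    rw [Finset.ssubset_iff_subset_ne]
    refine ⟨hsub, fun heq => ?_⟩
    rcases hc with ⟨h1, h2⟩ | ⟨h1, h2⟩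
    · exact h2 (knight_iter_mono arr k c h1)
    · exact h1 (List.mem_toFinset.mp (heq.symm ▸ List.mem_toFinset.mpr h2))
  have hchain : ∀ k, k ≤ 64 → (knightIter arr 0 (knightBase arr)).toFinset.card + k ≤
      (knightIter arr k (knightBase arr)).toFinset.card := by
    intro k
    induction k with
    | zero => intro _; omega
    | succ k ih =>
      intro hk
      have h1 := hlt k (by omega)
      have h2 := ih (by omega)
      omega
  have h64 := hchain 64 le_rfl
  have hle := knight_card_le arr 64
  have h0 : (knightIter arr 0 (knightBase arr)).toFinset.card = 0 := by omega
  have hbase : knightBase arr = [] := by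
    have : (knightBase arr).toFinset = ∅ := Finset.card_eq_zero.mp h0
    simpa using this
  obtain ⟨c, hc⟩ := h 0 (by omega)
  rcases hc with ⟨h1, _⟩ | ⟨_, h2⟩
  · simp only [knightIter, hbase] at h1
    cases h1
  · rw [knightIter_succ_out, knight_mem_step] at h2
    obtain ⟨hcell, hor⟩ := h2
    rcases hor with hval | ⟨m, _, hmem⟩
    · have : c ∈ knightBase arr := List.mem_filter.mpr ⟨hcell, hval⟩
      rw [hbase] at this; cases this
    · simp only [knightIter, hbase] at hmem; cases hmem

theorem knight_stab63 (arr : List (List Int)) (m : Nat) (hm : 63 ≤ m) (c : Int × Int) :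
    (c ∈ knightIter arr m (knightBase arr) ↔ c ∈ knightIter arr 63 (knightBase arr)) := by
  obtain ⟨k, hk, hfix⟩ := knight_exists_fix arr
  have h1 := knight_stab_of arr k hfix (m - k) c
  have h2 := knight_stab_of arr k hfix (63 - k) c
  rw [Nat.add_sub_cancel' (le_trans hk hm)] at h1
  rw [Nat.add_sub_cancel' hk] at h2
  rw [h1, h2]

theorem knight_A_neg (arr : List (List Int)) (i j n : Int) (h : n < 0) :
    knight_dfs arr i j n = false := by
  rw [knight_dfs]; simp [h]

theorem knight_val_some (arr : List (List Int))
    (hfb : 8 ≤ arr.length ∧ ∀ row ∈ arr.take 8, 8 ≤ row.length)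
    (i j : Int) (hi : 0 ≤ i) (hi7 : i ≤ 7) (hj : 0 ≤ j) (hj7 : j ≤ 7) :
    ∃ v, (PySem.List.pyGet? arr i).bind (fun row => PySem.List.pyGet? row j) = some v := by
  obtain ⟨hlen, hrow⟩ := hfb
  rw [PySem.List.pyGet?_of_nonneg arr hi]
  have hilen : i.toNat < arr.length := by omega
  rw [List.getElem?_eq_getElem hilen]
  have hrmem : arr[i.toNat] ∈ arr.take 8 := by
    have : (arr.take 8)[i.toNat]'(by simp; omega) = arr[i.toNat] := List.getElem_take
    exact this ▸ List.getElem_mem _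
  have hrl : 8 ≤ arr[i.toNat].length := hrow _ hrmem
  simp only [Option.bind_some]
  rw [PySem.List.pyGet?_of_nonneg _ hj]
  rw [List.getElem?_eq_getElem (by omega)]
  exact ⟨_, rfl⟩

theorem knight_A_iter (arr : List (List Int))
    (hfb : 8 ≤ arr.length ∧ ∀ row ∈ arr.take 8, 8 ≤ row.length) :
    ∀ (k : Nat) (i j : Int),
      (knight_dfs arr i j (k : Int) = true ↔ (i, j) ∈ knightIter arr k (knightBase arr)) := by
  intro k
  induction k with
  | zero =>
    intro i j
    by_cases hb : 0 ≤ i ∧ i ≤ 7 ∧ 0 ≤ j ∧ j ≤ 7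
    · obtain ⟨v, hv⟩ := knight_val_some arr hfb i j hb.1 hb.2.1 hb.2.2.1 hb.2.2.2
      rw [knight_dfs, if_neg (by omega), if_neg (by simp; omega), hv]
      simp only [knightIter]
      simp [knight_A_neg, knightBase, List.mem_filter, knight_mem_cells, knightVal, hv, hb]
    · rw [knight_dfs]
      rw [if_neg (by omega), if_pos (by simp; omega)]
      simp only [knightIter]
      constructor
      · intro h; cases h
      · intro h
        have := (List.mem_filter.mp h).1
        rw [knight_mem_cells] at this
        omega
  | succ k ih =>
    intro i j
    have hc1 : ((k+1 : Nat) : Int) - 1 = (k : Int) := by push_cast; ring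
    rw [knightIter_succ_out, knight_mem_step]
    by_cases hb : 0 ≤ i ∧ i ≤ 7 ∧ 0 ≤ j ∧ j ≤ 7
    · obtain ⟨v, hv⟩ := knight_val_some arr hfb i j hb.1 hb.2.1 hb.2.2.1 hb.2.2.2
      rw [knight_dfs]
      rw [if_neg (by omega), if_neg (by simp; omega)]
      simp only [hv, hc1]
      have hcell : (i, j) ∈ knightCells := (knight_mem_cells i j).mpr hb
      by_cases hv1 : v = 1
      · simp only [hv1]
        simp [hcell, knightVal, hv, hv1]
      · rw [if_neg (by simpa using hv1)]
        simp only [Bool.or_eq_true, ih]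
        have hval : knightVal arr i j = false := by
          simp [knightVal, hv, hv1]
        simp [hcell, hval, knightMoves]
        tauto
    · rw [knight_dfs]
      rw [if_neg (by omega), if_pos (by simp; omega)]
      simp only [Bool.false_eq_true, false_iff]
      intro hmem
      have := (knight_mem_cells i j).mp hmem.1
      omega

-- ===== VERDICT (by name: the statement is the Claim_ definition above) =====
theorem knight_dfs_spec : Claim_equal_knight_dfs := by
  intro arr i j n _dom hpre
  unfold Spec_knight_dfs
  unfold Pre_knight_dfs at hpre
  by_cases hn : n < 0
  · rw [knight_A_neg arr i j n hn]
    unfold knight_dfs_alt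
    rw [if_pos (by simp [hn])]
  · by_cases hb : 0 ≤ i ∧ i ≤ 7 ∧ 0 ≤ j ∧ j ≤ 7
    · have hfb : 8 ≤ arr.length ∧ ∀ row ∈ arr.take 8, 8 ≤ row.length := by
        rcases hpre with h|h|h|h|h|h
        · omega
        · omega
        · omega
        · omega
        · omega
        · exact h
      have hnn : (n.toNat : Int) = n := Int.toNat_of_nonneg (by omega)
      have hA := knight_A_iter arr hfb n.toNat i j
      rw [hnn] at hA
      unfold knight_dfs_alt
      rw [if_neg (by simp; omega)]
      by_cases h63 : n ≤ 63
      · rw [min_eq_left h63, Bool.eq_iff_iff, hA]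
        simp
      · rw [min_eq_right (by omega : (63:Int) ≤ n), Bool.eq_iff_iff, hA]
        have h33 : ((63:Int)).toNat = 63 := rfl
        rw [h33]
        simp only [decide_eq_true_eq]
        exact knight_stab63 arr n.toNat (by omega) (i, j)
    · rw [knight_dfs, if_neg hn, if_pos (by simp; omega)]
      unfold knight_dfs_alt
      rw [if_pos (by simp; omega)]
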